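-- pv_equiv track=rewrite | github.com/Nearrin/CompetitiveProgrammingSolutions | LeetCode/divide-two-integers.py | fake_mul
-- ===== SOURCE A (Python) =====
-- def fake_mul(a,b):
--     if b<0:
--         return fake_mul(-a,-b)
--     if not b:
--         return 0
--     t=fake_mul(a,b>>1)
--     t=t<<1
--     if b&1:
--         t=t+a
--     return t
-- ===== SOURCE B (Python) =====
-- def fake_mul(a, b):
--     if b < 0:
--         a, b = -a, -b
--     result = 0
--     while b:
--         if b & 1:
--             result += a
--         a <<= 1
--         b >>= 1
--     return result
-- ===== Notes on version B (the rewrite author's own statement) =====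
-- stated objective: idiomatic
-- what changed: Replaces the recursion on b>>1 (which doubles the returned partial product) by an iterative low-bit-first shift-and-add loop with an explicit accumulator.
import Mathlib
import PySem

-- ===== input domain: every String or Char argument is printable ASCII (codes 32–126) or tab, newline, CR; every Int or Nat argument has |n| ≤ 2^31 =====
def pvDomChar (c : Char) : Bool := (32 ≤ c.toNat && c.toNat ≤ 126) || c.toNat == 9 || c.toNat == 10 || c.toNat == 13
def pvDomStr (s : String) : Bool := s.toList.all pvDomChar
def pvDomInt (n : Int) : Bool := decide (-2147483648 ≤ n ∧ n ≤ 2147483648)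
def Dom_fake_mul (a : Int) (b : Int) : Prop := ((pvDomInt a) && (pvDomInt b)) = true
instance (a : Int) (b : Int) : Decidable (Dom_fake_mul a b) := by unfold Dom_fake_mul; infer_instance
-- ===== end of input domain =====

-- B is the iterative low-bit-first shift-and-add loop; same value as A's recursion everywhere.

-- ===== PORT A =====
-- Python b>>1 = floor division by 2, t<<1 = t*2, b&1 = b mod 2 (exact for all ints).
def fake_mul (a : Int) (b : Int) : Int :=
  if b < 0 then fake_mul (-a) (-b)
  else if b = 0 then 0
  else
    let t := fake_mul a (PySem.Int.floordiv b 2)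
    let t := t * 2
    if PySem.Int.mod b 2 = 1 then t + a else t
termination_by ((if b < 0 then 1 else 0 : Nat), b.natAbs)
decreasing_by
  · rename_i hb
    simp only [if_pos hb, if_neg (by omega : ¬(-b < 0))]
    exact Prod.Lex.left _ _ (by omega)
  · rename_i hb h0
    have h2 : PySem.Int.floordiv b 2 = b / 2 := PySem.Int.floordiv_eq_ediv_of_pos (by omega)
    rw [h2]
    simp only [if_neg hb, if_neg (by omega : ¬(b / 2 < 0))]
    exact Prod.Lex.right _ (by omega)

-- ===== PORT B =====
-- Loop of Source B: while b: if b&1: result += a; a <<= 1; b >>= 1.  Only entered with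
-- b ≥ 0 (after the sign fix), where "while b" is "while b > 0"; the b ≤ 0 guard makes it total.
def fakeMulLoop (a : Int) (b : Int) (result : Int) : Int :=
  if b ≤ 0 then result
  else
    fakeMulLoop (a * 2) (PySem.Int.floordiv b 2)
      (if PySem.Int.mod b 2 = 1 then result + a else result)
termination_by b.natAbs
decreasing_by
  have h2 : PySem.Int.floordiv b 2 = b / 2 := PySem.Int.floordiv_eq_ediv_of_pos (by omega)
  simp_all; omega

def fake_mul_alt (a : Int) (b : Int) : Int :=
  if b < 0 then fakeMulLoop (-a) (-b) 0 else fakeMulLoop a b 0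

-- ===== PRECONDITION & SPEC =====
def Spec_fake_mul (a : Int) (b : Int) (out : Int) : Prop := out = fake_mul_alt a b
instance (a : Int) (b : Int) (out : Int) : Decidable (Spec_fake_mul a b out) := by unfold Spec_fake_mul; infer_instance

-- ===== CLAIM (what is proved, stated in full; the proofs are below) =====
def Claim_equal_fake_mul : Prop := ∀ (a : Int) (b : Int), Dom_fake_mul a b → Spec_fake_mul a b (fake_mul a b)

-- ===== LEMMAS AND PROOFS =====

theorem fakeMulLoop_eq (n : Nat) : ∀ (b : Int), b.natAbs = n → 0 ≤ b → ∀ (a result : Int), fakeMulLoop a b result = result + a * b := by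
  induction n using Nat.strong_induction_on with
  | _ n ih =>
  intro b hn hb a result
  unfold fakeMulLoop
  split
  · have hz : b = 0 := by omega
    simp [hz]
  · rename_i h
    have hpos : 0 < b := by omega
    have h2 : PySem.Int.floordiv b 2 = b / 2 := PySem.Int.floordiv_eq_ediv_of_pos (by omega)
    have hm : PySem.Int.mod b 2 = b % 2 := PySem.Int.mod_eq_emod_of_pos (by omega)
    rw [h2, hm, ih (b / 2).natAbs (by omega) (b / 2) rfl (by omega)]
    have hbit : b = 2 * (b / 2) + b % 2 := by omega
    by_cases hb1 : b % 2 = 1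
    · rw [hb1] at hbit; simp [hb1]; generalize hq : b / 2 = q at hbit ⊢; subst hbit; ring
    · have h0' : b % 2 = 0 := by omega
      rw [h0'] at hbit; simp [hb1]; generalize hq : b / 2 = q at hbit ⊢; subst hbit; ring

theorem fake_mul_eq (n : Nat) : ∀ (b : Int), b.natAbs = n → 0 ≤ b → ∀ (a : Int), fake_mul a b = a * b := by
  induction n using Nat.strong_induction_on with
  | _ n ih =>
  intro b hn hb a
  unfold fake_mul
  split
  · omega
  · split
    · simp_all
    · rename_i h0 hne
      have hpos : 0 < b := by omega
      have h2 : PySem.Int.floordiv b 2 = b / 2 := PySem.Int.floordiv_eq_ediv_of_pos (by omega)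
      have hm : PySem.Int.mod b 2 = b % 2 := PySem.Int.mod_eq_emod_of_pos (by omega)
      rw [h2, hm, ih (b / 2).natAbs (by omega) (b / 2) rfl (by omega)]
      have hbit : b = 2 * (b / 2) + b % 2 := by omega
      show (if b % 2 = 1 then a * (b / 2) * 2 + a else a * (b / 2) * 2) = a * b
      by_cases hb1 : b % 2 = 1
      · rw [hb1] at hbit; rw [if_pos hb1]; generalize hq : b / 2 = q at hbit ⊢; subst hbit; ring
      · have h0' : b % 2 = 0 := by omega
        rw [h0'] at hbit; rw [if_neg hb1]; generalize hq : b / 2 = q at hbit ⊢; subst hbit; ring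

theorem fake_mul_alt_eq (a b : Int) : fake_mul_alt a b = a * b := by
  unfold fake_mul_alt
  split
  · rw [fakeMulLoop_eq (-b).natAbs (-b) rfl (by omega)]; ring
  · rw [fakeMulLoop_eq b.natAbs b rfl (by omega)]; ring

-- ===== VERDICT (by name: the statement is the Claim_ definition above) =====
theorem fake_mul_spec : Claim_equal_fake_mul := by
  intro a b _
  show fake_mul a b = fake_mul_alt a b
  rw [fake_mul_alt_eq]
  by_cases hb : b < 0
  · rw [fake_mul]
    rw [if_pos hb, fake_mul_eq (-b).natAbs (-b) rfl (by omega)]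
    ring
  · rw [fake_mul_eq b.natAbs b rfl (by omega)]
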